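-- pv_equiv track=rewrite | github.com/proboscis/doeff | doeff/_types_internal.py | _traceback_frame_spans
-- ===== SOURCE A (Python) =====
-- def _traceback_frame_spans(body: list[str]) -> list[tuple[int, int]]:
--     spans: list[tuple[int, int]] = []
--     index = 0
--     while index < len(body):
--         line = body[index]
--         if line.lstrip().startswith("File "):
--             start = index
--             index += 1
--             while index < len(body) and not body[index].lstrip().startswith("File "):
--                 index += 1
--             spans.append((start, index))
--         else:
--             index += 1
--     return spans
-- ===== SOURCE B (Python) =====
-- def _traceback_frame_spans(body: list[str]) -> list[tuple[int, int]]: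
--     starts = [i for i, line in enumerate(body) if line.lstrip().startswith("File ")]
--     return list(zip(starts, starts[1:] + [len(body)]))
-- ===== Notes on version B (the rewrite author's own statement) =====
-- stated objective: simpler
-- what changed: Replaces the nested while-loop grouping with a single pass that collects the indices of 'File ' lines and then pairs each start with the next start (or len(body)).
import Mathlib
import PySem

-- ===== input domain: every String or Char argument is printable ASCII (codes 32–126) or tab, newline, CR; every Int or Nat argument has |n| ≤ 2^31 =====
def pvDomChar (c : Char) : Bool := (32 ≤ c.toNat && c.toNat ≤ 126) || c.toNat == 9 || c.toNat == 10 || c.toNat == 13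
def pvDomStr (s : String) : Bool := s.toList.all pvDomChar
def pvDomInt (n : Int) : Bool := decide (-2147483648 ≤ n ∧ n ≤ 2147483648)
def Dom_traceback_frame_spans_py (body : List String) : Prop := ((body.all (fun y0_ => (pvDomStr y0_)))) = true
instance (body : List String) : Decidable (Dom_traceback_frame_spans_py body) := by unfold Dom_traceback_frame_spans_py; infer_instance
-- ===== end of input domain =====

-- B replaces A's nested while-loop grouping by an index table of 'File ' lines paired with the
-- following start (or len(body)); objective: simpler.

-- shared predicate: line.lstrip().startswith("File ")
def pvIsFile (line : String) : Bool :=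
  PySem.Str.startswith (PySem.Str.lstrip line) "File "

-- ===== PORT A =====
-- inner while: index += 1 while not a 'File ' line
def pvSkipA (body : List String) (index : Nat) : Nat :=
  if h : index < body.length then
    if pvIsFile body[index] then index
    else pvSkipA body (index + 1)
  else index
termination_by body.length - index

theorem pvSkipA_ge (body : List String) (index : Nat) : index ≤ pvSkipA body index := by
  fun_induction pvSkipA body index with
  | case1 => omega
  | case2 _ _ _ ih => omega
  | case3 => omega

-- outer while with the spans accumulator
def pvLoopA (body : List String) (index : Nat) (spans : List (Int × Int)) : List (Int × Int) :=
  if h : index < body.length then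
    if pvIsFile body[index] then
      let j := pvSkipA body (index + 1)
      pvLoopA body j (spans ++ [((index : Int), (j : Int))])
    else pvLoopA body (index + 1) spans
  else spans
termination_by body.length - index
decreasing_by
  · have := pvSkipA_ge body (index + 1); omega
  · omega

def traceback_frame_spans_py (body : List String) : List (Int × Int) :=
  pvLoopA body 0 []

-- ===== PORT B =====
def traceback_frame_spans_py_alt (body : List String) : List (Int × Int) :=
  let starts := ((PySem.List.enumerate body).filter (fun q => pvIsFile q.2)).map (·.1)
  starts.zip (starts.drop 1 ++ [(body.length : Int)])

-- ===== PRECONDITION & SPEC =====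
def Spec_traceback_frame_spans_py (body : List String) (out : List (Int × Int)) : Prop := out = traceback_frame_spans_py_alt body
instance (body : List String) (out : List (Int × Int)) : Decidable (Spec_traceback_frame_spans_py body out) := by unfold Spec_traceback_frame_spans_py; infer_instance

-- ===== CLAIM (what is proved, stated in full; the proofs are below) =====
def Claim_equal_traceback_frame_spans_py : Prop := ∀ (body : List String), Dom_traceback_frame_spans_py body → Spec_traceback_frame_spans_py body (traceback_frame_spans_py body)

-- ===== LEMMAS AND PROOFS =====

-- the indices ≥ i of 'File ' lines
def pvStarts (body : List String) (i : Nat) : List Int :=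
  if h : i < body.length then
    if pvIsFile body[i] then (i : Int) :: pvStarts body (i + 1) else pvStarts body (i + 1)
  else []
termination_by body.length - i

-- adjacent pairing with final end n
def pvZP (n : Int) : List Int → List (Int × Int)
  | [] => []
  | [a] => [(a, n)]
  | a :: b :: t => (a, b) :: pvZP n (b :: t)

theorem pvZP_eq_zip (n : Int) (xs : List Int) :
    xs.zip (xs.drop 1 ++ [n]) = pvZP n xs := by
  induction xs with
  | nil => simp [pvZP]
  | cons a t ih =>
    cases t with
    | nil => simp [pvZP]
    | cons b t' => simpa [pvZP] using ih

theorem pvLoopA_acc (body : List String) (index : Nat) (spans : List (Int × Int)) :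
    pvLoopA body index spans = spans ++ pvLoopA body index [] := by
  induction hf : body.length - index using Nat.strong_induction_on generalizing index spans with
  | _ n ih =>
    conv_lhs => rw [pvLoopA]
    conv_rhs => rw [pvLoopA]
    by_cases h : index < body.length
    · by_cases hp : pvIsFile body[index] = true
      · simp only [h, hp, dif_pos, if_pos]
        have hge := pvSkipA_ge body (index + 1)
        rw [ih _ (by omega) _ _ rfl,
          ih _ (by omega) (pvSkipA body (index + 1))
            ([] ++ [((index : Int), ((pvSkipA body (index + 1) : Nat) : Int))]) rfl]
        simp
      · simp only [h, hp, dif_pos, if_neg, Bool.false_eq_true, not_false_eq_true]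
        exact ih _ (by omega) _ _ rfl
    · simp [h]

theorem pvSkipA_le (body : List String) (i : Nat) (h : i ≤ body.length) :
    pvSkipA body i ≤ body.length := by
  fun_induction pvSkipA body i with
  | case1 => omega
  | case2 _ _ _ ih => exact ih (by omega)
  | case3 => omega

theorem pvSkipA_isFile (body : List String) (i : Nat) (h : pvSkipA body i < body.length) :
    pvIsFile body[pvSkipA body i] = true := by
  fun_induction pvSkipA body i with
  | case1 => simp_all
  | case2 _ _ _ ih => exact ih h
  | case3 hlt => omega

theorem pvStarts_skip (body : List String) (i : Nat) :
    pvStarts body (pvSkipA body i) = pvStarts body i := by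
  fun_induction pvSkipA body i with
  | case1 => rfl
  | case2 i hlt hp ih =>
    rw [ih]; conv_rhs => rw [pvStarts]
    simp [hlt, hp]
  | case3 => rfl

theorem pvStarts_head (body : List String) (i : Nat) (h : i < body.length)
    (hp : pvIsFile body[i] = true) : pvStarts body i = (i : Int) :: pvStarts body (i + 1) := by
  rw [pvStarts]; simp [h, hp]

theorem pvStarts_nil (body : List String) (i : Nat) (h : body.length ≤ i) :
    pvStarts body i = [] := by
  rw [pvStarts]; simp; omega

theorem pvLoopA_eq (body : List String) (i : Nat) :
    pvLoopA body i [] = pvZP (body.length : Int) (pvStarts body i) := by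
  induction hf : body.length - i using Nat.strong_induction_on generalizing i with
  | _ n ih =>
    rw [pvLoopA]
    by_cases h : i < body.length
    · by_cases hp : pvIsFile body[i] = true
      · simp only [h, hp, dif_pos, if_pos]
        set j := pvSkipA body (i + 1) with hj
        have hge : i + 1 ≤ j := pvSkipA_ge body (i + 1)
        rw [pvLoopA_acc, ih _ (by omega) _ rfl, pvStarts_head body i h hp]
        have hsk : pvStarts body j = pvStarts body (i + 1) := pvStarts_skip body (i + 1)
        rw [← hsk]
        have hle : j ≤ body.length := pvSkipA_le body (i + 1) (by omega)
        by_cases hjl : j < body.length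
        · rw [pvStarts_head body j hjl (pvSkipA_isFile body (i + 1) hjl)]
          rfl
        · have : j = body.length := by omega
          rw [pvStarts_nil body j (by omega)]
          simp [pvZP, this]
      · simp only [h, hp, dif_pos, if_neg, Bool.false_eq_true, not_false_eq_true]
        rw [ih _ (by omega) _ rfl]
        conv_rhs => rw [pvStarts]
        simp [h, hp]
    · rw [pvStarts_nil body i (by omega)]
      simp [h, pvZP]

theorem pvStarts_enum (body : List String) :
    ∀ i, ((PySem.List.enumerate (body.drop i) (i : Int)).filter (fun q => pvIsFile q.2)).map (·.1)
      = pvStarts body i := by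
  intro i
  induction hf : body.length - i using Nat.strong_induction_on generalizing i with
  | _ n ih =>
    by_cases h : i < body.length
    · rw [List.drop_eq_getElem_cons h, PySem.List.enumerate_cons, List.filter_cons]
      have hcast : (i : Int) + 1 = ((i + 1 : Nat) : Int) := by push_cast; ring
      have hrec := ih (body.length - (i + 1)) (by omega) (i + 1) rfl
      rw [pvStarts]
      by_cases hp : pvIsFile body[i] = true
      · simp only [hp, if_pos, List.map_cons, hcast, hrec]
        simp [h]
      · simp only [hp, Bool.false_eq_true, if_neg, not_false_eq_true, hcast, hrec]
        simp [h]
    · rw [List.drop_of_length_le (by omega), pvStarts_nil body i (by omega)]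
      simp [PySem.List.enumerate]

-- ===== VERDICT (by name: the statement is the Claim_ definition above) =====
theorem traceback_frame_spans_py_spec : Claim_equal_traceback_frame_spans_py := by
  intro body _
  unfold Spec_traceback_frame_spans_py traceback_frame_spans_py traceback_frame_spans_py_alt
  rw [pvLoopA_eq]
  have := pvStarts_enum body 0
  simp only [List.drop_zero, Int.ofNat_zero] at this
  rw [← this, pvZP_eq_zip]
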